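-- pv_equiv track=rewrite | github.com/rishi02102017/seq2seq-lstm-sketch-generator | Code.py | deltas_to_absolute
-- ===== SOURCE A (Python) =====
-- def deltas_to_absolute(deltas):
--     abs_x, abs_y = 0, 0
--     abs_points = []
--     for dx, dy, pen in deltas:
--         abs_x += dx
--         abs_y += dy
--         abs_points.append((abs_x, abs_y, pen))
--     return abs_points
-- ===== SOURCE B (Python) =====
-- def _prefix_sums(vals):
--     out = []
--     s = 0
--     for v in vals:
--         s += v
--         out.append(s)
--     return out
--
--
-- def deltas_to_absolute(deltas):
--     xs, ys, pens = [], [], []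
--     for dx, dy, pen in deltas:
--         xs.append(dx)
--         ys.append(dy)
--         pens.append(pen)
--     return list(zip(_prefix_sums(xs), _prefix_sums(ys), pens))
-- ===== Notes on version B (the rewrite author's own statement) =====
-- stated objective: alternative
-- what changed: Replaces A's single interleaved scan carrying (abs_x, abs_y) state by a column decomposition: split the input into three parallel lists, take two independent prefix-sum passes, and recombine with zip.
import Mathlib
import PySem

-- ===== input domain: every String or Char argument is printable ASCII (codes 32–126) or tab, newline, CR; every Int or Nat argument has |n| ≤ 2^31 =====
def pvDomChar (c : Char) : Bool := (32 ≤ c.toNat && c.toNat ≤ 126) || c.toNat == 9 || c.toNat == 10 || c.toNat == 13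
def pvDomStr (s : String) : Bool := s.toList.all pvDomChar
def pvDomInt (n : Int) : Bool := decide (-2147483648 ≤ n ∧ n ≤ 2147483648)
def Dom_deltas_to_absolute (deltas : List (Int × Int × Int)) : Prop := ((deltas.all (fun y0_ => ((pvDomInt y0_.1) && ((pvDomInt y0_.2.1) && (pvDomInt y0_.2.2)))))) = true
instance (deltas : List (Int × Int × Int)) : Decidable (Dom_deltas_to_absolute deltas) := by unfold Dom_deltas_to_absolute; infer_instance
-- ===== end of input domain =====

-- B recomputes the same absolute points by column decomposition (unzip + two prefix-sum passes + zip) instead of one stateful scan; same cost, different structure.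
-- ===== PORT A =====
def deltas_to_absolute (deltas : List (Int × Int × Int)) : List (Int × Int × Int) :=
  (deltas.foldl
    (fun (st : Int × Int × List (Int × Int × Int)) d =>
      (st.1 + d.1, st.2.1 + d.2.1, st.2.2 ++ [(st.1 + d.1, st.2.1 + d.2.1, d.2.2)]))
    (0, 0, [])).2.2

-- ===== PORT B =====
-- prefix sums starting from running total s (port of _prefix_sums's loop)
def pvPrefixSums (s : Int) : List Int → List Int
  | [] => []
  | v :: vs => (s + v) :: pvPrefixSums (s + v) vs

def pvZip3 : List Int → List Int → List Int → List (Int × Int × Int)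
  | a :: as, b :: bs, c :: cs => (a, b, c) :: pvZip3 as bs cs
  | _, _, _ => []

def deltas_to_absolute_alt (deltas : List (Int × Int × Int)) : List (Int × Int × Int) :=
  let xs := deltas.map (fun d => d.1)
  let ys := deltas.map (fun d => d.2.1)
  let pens := deltas.map (fun d => d.2.2)
  pvZip3 (pvPrefixSums 0 xs) (pvPrefixSums 0 ys) pens

-- ===== PRECONDITION & SPEC =====
def Spec_deltas_to_absolute (deltas : List (Int × Int × Int)) (out : List (Int × Int × Int)) : Prop := out = deltas_to_absolute_alt deltas
instance (deltas : List (Int × Int × Int)) (out : List (Int × Int × Int)) : Decidable (Spec_deltas_to_absolute deltas out) := by unfold Spec_deltas_to_absolute; infer_instance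

-- ===== CLAIM (what is proved, stated in full; the proofs are below) =====
def Claim_equal_deltas_to_absolute : Prop := ∀ (deltas : List (Int × Int × Int)), Dom_deltas_to_absolute deltas → Spec_deltas_to_absolute deltas (deltas_to_absolute deltas)

-- ===== LEMMAS AND PROOFS =====

-- ===== VERDICT (by name: the statement is the Claim_ definition above) =====
theorem pvFold_eq (l : List (Int × Int × Int)) : ∀ (x y : Int) (acc : List (Int × Int × Int)),
    (l.foldl
      (fun (st : Int × Int × List (Int × Int × Int)) d =>
        (st.1 + d.1, st.2.1 + d.2.1, st.2.2 ++ [(st.1 + d.1, st.2.1 + d.2.1, d.2.2)]))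
      (x, y, acc)).2.2
    = acc ++ pvZip3 (pvPrefixSums x (l.map (fun d => d.1)))
        (pvPrefixSums y (l.map (fun d => d.2.1))) (l.map (fun d => d.2.2)) := by
  induction l with
  | nil => intro x y acc; simp [pvZip3]
  | cons d tl ih =>
    intro x y acc
    simp only [List.foldl_cons, List.map_cons, pvPrefixSums, pvZip3]
    rw [ih]
    simp

theorem deltas_to_absolute_spec : Claim_equal_deltas_to_absolute := by
  intro deltas _
  unfold Spec_deltas_to_absolute deltas_to_absolute deltas_to_absolute_alt
  simpa using pvFold_eq deltas 0 0 []
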